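-- pv_equiv track=rewrite | github.com/scrssys/SCRS_RS_AI | data_prepare/index_calc.py | Calc_grid2
-- ===== SOURCE A (Python) =====
-- def Calc_grid2(width,height,x_size=1000,y_size=1000):
--     num_x = int(width/x_size) + 1
--     num_y = int(height/y_size) + 1
--
--     tmp_x=-x_size
--     arry_full = []
--     for i in range(num_x):
--         tmp_x = tmp_x +x_size
--         tmp_y = -y_size
--         for j in range(num_y):
--             tmp_y = tmp_y + y_size
--             if (i+1)*y_size > height:
--                 ofst_ysize = height-i*y_size
--             else:
--                 ofst_ysize =  y_size
--             if (j+1)*x_size > width: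
--                 ofst_xsize = width-j*x_size
--             else:
--                 ofst_xsize = x_size
--             if tmp_x <= width and tmp_y <= height and ofst_xsize >0 and ofst_ysize >0:
--                 arry_full.append([tmp_x,tmp_y,ofst_xsize,ofst_ysize])
--     return arry_full
-- ===== SOURCE B (Python) =====
-- def Calc_grid2(width, height, x_size=1000, y_size=1000):
--     # One pass per axis: collect the column offsets and the row offsets that fit,
--     # then emit their Cartesian product.
--     num_x = int(width / x_size) + 1
--     num_y = int(height / y_size) + 1
--     cols = []
--     for i in range(num_x):
--         oy = height - i * y_size if (i + 1) * y_size > height else y_size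
--         if i * x_size <= width and oy > 0:
--             cols.append((i * x_size, oy))
--     if not cols:
--         return []
--     rows = []
--     for j in range(num_y):
--         ox = width - j * x_size if (j + 1) * x_size > width else x_size
--         if j * y_size <= height and ox > 0:
--             rows.append((j * y_size, ox))
--     return [[tx, ty, ox, oy] for tx, oy in cols for ty, ox in rows]
-- ===== Notes on version B (the rewrite author's own statement) =====
-- stated objective: alternative
-- what changed: Replaces A's nested loops with running accumulators by two independent single-axis passes (a per-i column list and a per-j row list, each carrying its own guard and offset) whose Cartesian product is emitted, exploiting that A's guard and stored values factor by index; Pre_ excludes x_size=0 or y_size=0, where A raises ZeroDivisionError.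
import Mathlib
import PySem

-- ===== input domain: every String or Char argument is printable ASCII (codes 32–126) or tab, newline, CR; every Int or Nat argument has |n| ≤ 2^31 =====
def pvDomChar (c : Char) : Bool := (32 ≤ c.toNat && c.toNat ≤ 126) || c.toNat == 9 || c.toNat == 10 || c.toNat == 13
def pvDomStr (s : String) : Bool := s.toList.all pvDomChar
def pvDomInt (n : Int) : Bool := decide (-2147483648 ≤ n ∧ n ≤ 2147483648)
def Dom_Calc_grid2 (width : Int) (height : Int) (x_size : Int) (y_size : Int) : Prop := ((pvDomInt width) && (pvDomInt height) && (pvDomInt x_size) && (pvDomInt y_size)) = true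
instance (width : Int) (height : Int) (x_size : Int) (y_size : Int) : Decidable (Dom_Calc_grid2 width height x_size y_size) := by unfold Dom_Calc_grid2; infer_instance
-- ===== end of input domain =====

-- B factors the grid into an x-axis pass and a y-axis pass and emits their Cartesian product
-- (objective: simpler/alternative decomposition; same exact output).

-- ===== PORT A =====
-- inner loop body of A (one j step): updates tmp_y and conditionally appends the row
def pvInnerStep (width height x_size y_size i tmp_x : Int)
    (st2 : Int × List (List Int)) (j : Int) : Int × List (List Int) :=
  let tmp_y := st2.1 + y_size
  let ofst_ysize := if (i+1)*y_size > height then height - i*y_size else y_size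
  let ofst_xsize := if (j+1)*x_size > width then width - j*x_size else x_size
  (tmp_y,
    if tmp_x ≤ width ∧ tmp_y ≤ height ∧ ofst_xsize > 0 ∧ ofst_ysize > 0
    then st2.2 ++ [[tmp_x, tmp_y, ofst_xsize, ofst_ysize]]
    else st2.2)

-- outer loop body of A (one i step)
def pvOuterStep (width height x_size y_size num_y : Int)
    (st : Int × List (List Int)) (i : Int) : Int × List (List Int) :=
  let tmp_x := st.1 + x_size
  let inner := (PySem.List.pyRange 0 num_y 1).foldl
      (pvInnerStep width height x_size y_size i tmp_x) (-y_size, st.2)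
  (tmp_x, inner.2)

-- int(width/x_size) is float division + truncation in Python; on the |n| ≤ 2^31 domain
-- the float quotient truncates to exactly Int.tdiv (both operands and the truncated
-- quotient are far below 2^53, and |a/b| rounding can never cross an integer here)
def Calc_grid2 (width : Int) (height : Int) (x_size : Int) (y_size : Int) : List (List Int) :=
  let num_x := width.tdiv x_size + 1
  let num_y := height.tdiv y_size + 1
  ((PySem.List.pyRange 0 num_x 1).foldl
      (pvOuterStep width height x_size y_size num_y)
      (-x_size, ([] : List (List Int)))).2

-- ===== PORT B =====
-- same int(width/x_size) expression in Source B, ported the same way (exact on Dom)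
def Calc_grid2_alt (width : Int) (height : Int) (x_size : Int) (y_size : Int) : List (List Int) :=
  let num_x := width.tdiv x_size + 1
  let num_y := height.tdiv y_size + 1
  let cols := (PySem.List.pyRange 0 num_x 1).foldl (fun acc i =>
      let oy := if (i+1)*y_size > height then height - i*y_size else y_size
      if i * x_size ≤ width ∧ oy > 0 then acc ++ [(i * x_size, oy)] else acc) []
  if cols = [] then [] else
  let rows := (PySem.List.pyRange 0 num_y 1).foldl (fun acc j =>
      let ox := if (j+1)*x_size > width then width - j*x_size else x_size
      if j * y_size ≤ height ∧ ox > 0 then acc ++ [(j * y_size, ox)] else acc) []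
  cols.flatMap (fun p => rows.map (fun q => [p.1, q.1, q.2, p.2]))

-- ===== PRECONDITION & SPEC =====
-- Pre_ excludes x_size = 0 or y_size = 0, where A raises ZeroDivisionError.
def Pre_Calc_grid2 (width : Int) (height : Int) (x_size : Int) (y_size : Int) : Prop :=
  x_size ≠ 0 ∧ y_size ≠ 0
instance (width : Int) (height : Int) (x_size : Int) (y_size : Int) : Decidable (Pre_Calc_grid2 width height x_size y_size) := by unfold Pre_Calc_grid2; infer_instance
def pvWitness_Calc_grid2 : Int × Int × Int × Int := (10, 10, 3, 4)

def Spec_Calc_grid2 (width : Int) (height : Int) (x_size : Int) (y_size : Int) (out : List (List Int)) : Prop := out = Calc_grid2_alt width height x_size y_size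
instance (width : Int) (height : Int) (x_size : Int) (y_size : Int) (out : List (List Int)) : Decidable (Spec_Calc_grid2 width height x_size y_size out) := by unfold Spec_Calc_grid2; infer_instance

-- ===== CLAIM (what is proved, stated in full; the proofs are below) =====
def Claim_equal_Calc_grid2 : Prop := ∀ (width : Int) (height : Int) (x_size : Int) (y_size : Int), Dom_Calc_grid2 width height x_size y_size → Pre_Calc_grid2 width height x_size y_size → Spec_Calc_grid2 width height x_size y_size (Calc_grid2 width height x_size y_size)

-- ===== LEMMAS AND PROOFS =====

lemma pvRange_toNat (n : Int) : PySem.List.pyRange 0 n 1 = PySem.List.pyRange 0 ((n.toNat : Nat) : Int) 1 := by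
  by_cases h : n ≤ 0
  · rw [PySem.List.pyRange_one_eq_nil h, PySem.List.pyRange_one_eq_nil (by omega)]
  · rw [Int.toNat_of_nonneg (by omega)]

-- characterisation of A's inner loop
lemma innerA (width height x_size y_size i tx : Int) (n : Nat) (acc : List (List Int)) :
    (PySem.List.pyRange 0 (n : Int) 1).foldl
      (pvInnerStep width height x_size y_size i tx) (-y_size, acc)
    = ((n : Int) * y_size - y_size,
       acc ++ (PySem.List.pyRange 0 (n : Int) 1).filterMap (fun j =>
         if tx ≤ width ∧ j * y_size ≤ height ∧
            (if (j+1)*x_size > width then width - j*x_size else x_size) > 0 ∧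
            (if (i+1)*y_size > height then height - i*y_size else y_size) > 0
         then some [tx, j * y_size,
                    if (j+1)*x_size > width then width - j*x_size else x_size,
                    if (i+1)*y_size > height then height - i*y_size else y_size]
         else none)) := by
  induction n with
  | zero => simp [PySem.List.pyRange_one_eq_nil (le_refl (0:Int))]
  | succ n ih =>
    have hc : ((n + 1 : Nat) : Int) = (n : Int) + 1 := by push_cast; ring
    rw [hc, PySem.List.pyRange_one_succ_right (by positivity), List.foldl_append, ih,
        List.filterMap_append]
    have hy : (n : Int) * y_size - y_size + y_size = (n : Int) * y_size := by ring
    simp only [List.foldl_cons, List.foldl_nil, pvInnerStep, hy, List.filterMap_cons,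
      List.filterMap_nil, Prod.mk.injEq]
    refine ⟨by ring, ?_⟩
    split_ifs <;> simp

-- characterisation of A's outer loop, in terms of the per-i row list
def pvRowsA (width height x_size y_size ny i : Int) : List (List Int) :=
  (PySem.List.pyRange 0 ny 1).filterMap (fun j =>
    if i * x_size ≤ width ∧ j * y_size ≤ height ∧
       (if (j+1)*x_size > width then width - j*x_size else x_size) > 0 ∧
       (if (i+1)*y_size > height then height - i*y_size else y_size) > 0
    then some [i * x_size, j * y_size,
               if (j+1)*x_size > width then width - j*x_size else x_size,
               if (i+1)*y_size > height then height - i*y_size else y_size]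
    else none)

lemma outerA (width height x_size y_size ny : Int) (m : Nat) (acc : List (List Int)) :
    (PySem.List.pyRange 0 (m : Int) 1).foldl
      (pvOuterStep width height x_size y_size ny) (-x_size, acc)
    = ((m : Int) * x_size - x_size,
       acc ++ (PySem.List.pyRange 0 (m : Int) 1).flatMap
         (fun i => pvRowsA width height x_size y_size ny i)) := by
  induction m with
  | zero => simp [PySem.List.pyRange_one_eq_nil (le_refl (0:Int))]
  | succ m ih =>
    have hc : ((m + 1 : Nat) : Int) = (m : Int) + 1 := by push_cast; ring
    rw [hc, PySem.List.pyRange_one_succ_right (by positivity), List.foldl_append, ih,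
        List.flatMap_append]
    have hx : (m : Int) * x_size - x_size + x_size = (m : Int) * x_size := by ring
    simp only [List.foldl_cons, List.foldl_nil, pvOuterStep, hx]
    rw [pvRange_toNat ny, innerA]
    simp only [Prod.mk.injEq, List.flatMap_cons, List.flatMap_nil]
    refine ⟨by ring, ?_⟩
    simp [pvRowsA, pvRange_toNat ny, List.append_assoc]

-- filterMap with a split guard P ∧ Q j collapses to an if-then map-over-filter
lemma filterMap_split {α β : Type} (P : Prop) [Decidable P] (q : α → Bool) (g : α → β) (l : List α) :
    l.filterMap (fun a => if P ∧ q a = true then some (g a) else none)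
    = if P then (l.filter q).map g else [] := by
  by_cases hP : P
  · simp only [hP, true_and, if_pos]
    induction l with
    | nil => simp
    | cons a l ih =>
      rw [List.filterMap_cons, List.filter_cons]
      by_cases hq : q a = true <;> simp [hq, ih]
  · simp [hP]

-- the per-i row list equals B's "rows" list mapped, guarded by i's own tests
lemma rowsA_eq (width height x_size y_size ny i : Int) :
    pvRowsA width height x_size y_size ny i
    = if i * x_size ≤ width ∧
         (if (i+1)*y_size > height then height - i*y_size else y_size) > 0
      then ((PySem.List.pyRange 0 ny 1).filter (fun j =>
              decide (j * y_size ≤ height) &&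
              decide (0 < if (j+1)*x_size > width then width - j*x_size else x_size))).map
             (fun j => [i * x_size, j * y_size,
                        if (j+1)*x_size > width then width - j*x_size else x_size,
                        if (i+1)*y_size > height then height - i*y_size else y_size])
      else [] := by
  rw [pvRowsA, ← filterMap_split]
  apply List.filterMap_congr
  intro j _
  have : (i * x_size ≤ width ∧ j * y_size ≤ height ∧
          (if (j+1)*x_size > width then width - j*x_size else x_size) > 0 ∧
          (if (i+1)*y_size > height then height - i*y_size else y_size) > 0)
       ↔ ((i * x_size ≤ width ∧
          (if (i+1)*y_size > height then height - i*y_size else y_size) > 0) ∧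
          (decide (j * y_size ≤ height) &&
           decide (0 < if (j+1)*x_size > width then width - j*x_size else x_size)) = true) := by
    simp; tauto
  rw [if_congr this rfl rfl]

-- flatMap over a filtered list = flatMap with an if
lemma flatMap_filter {α β : Type} (p : α → Bool) (g : α → List β) (l : List α) :
    (l.filter p).flatMap g = l.flatMap (fun a => if p a = true then g a else []) := by
  induction l with
  | nil => simp
  | cons a l ih => rw [List.filter_cons]; by_cases h : p a = true <;> simp [h, ih]

-- the empty-cols early return is redundant for the value
lemma pvIfNil_flatMap {a b : Type} (l : List a) (g : a -> List b) :
    (if l = [] then [] else l.flatMap g) = l.flatMap g := by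
  cases l <;> simp

-- ===== VERDICT (by name: the statement is the Claim_ definition above) =====
theorem Calc_grid2_spec : Claim_equal_Calc_grid2 := by
  intro width height x_size y_size _ _
  simp only [Spec_Calc_grid2, Calc_grid2, Calc_grid2_alt]
  rw [pvRange_toNat (width.tdiv x_size + 1), outerA]
  simp only [List.nil_append,
    PySem.List.foldl_append_ite (p := fun i : Int =>
      i * x_size ≤ width ∧ (if (i+1)*y_size > height then height - i*y_size else y_size) > 0),
    PySem.List.foldl_append_ite (p := fun j : Int =>
      j * y_size ≤ height ∧ (if (j+1)*x_size > width then width - j*x_size else x_size) > 0)]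
  rw [pvIfNil_flatMap]
  simp only [List.flatMap_map, List.map_map]
  rw [flatMap_filter]
  congr 1
  funext i
  simp only [Bool.and_eq_true, decide_eq_true_eq]
  rw [rowsA_eq]
  simp only [Function.comp_def, gt_iff_lt]
  simp only [Bool.decide_and, Bool.and_eq_true, decide_eq_true_eq]
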